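-- pv_equiv track=rewrite | github.com/tgrishanina/codewars | equivalent_dice.py | eq_dice
-- ===== SOURCE A (Python) =====
-- from itertools import combinations_with_replacement
-- from functools import reduce
-- from operator import mul
--
-- def eq_dice(set_):
--     set_ = sorted(set_)
--     result = []
--
--     # Calculate the product of the input set
--     total = reduce(mul, set_, 1)
--
--     # Find factors of the total within the range [3, 21]
--     factors_filtered = [f for f in range(3, 21) if total % f == 0]
--
--     # Generate combinations efficiently
--     for r in range(1, max(len(set_), len(factors_filtered)) + 1):
--         for c in combinations_with_replacement(factors_filtered, r):
--             product = reduce(mul, c, 1)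
--             # Exclude the original input and single-element lists with the total value
--             if product == total and sorted(c) != set_ and sorted(c) != [total]:
--                 result.append(sorted(c))
--     return len(result)
-- ===== SOURCE B (Python) =====
-- def eq_dice(set_):
--     s = sorted(set_)
--     total = 1
--     for x in s:
--         total *= x
--     factors = [f for f in range(3, 21) if total % f == 0]
--     limit = max(len(s), len(factors))
--
--     # count(n, i, l): number of nondecreasing sequences (empty allowed) drawn
--     # from factors[i:], of length <= l, whose product is exactly n; memoized.
--     memo = {}
--     def count(n, i, l):
--         key = (n, i, l)
--         if key not in memo:
--             c = 1 if n == 1 else 0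
--             if l > 0:
--                 for j in range(i, len(factors)):
--                     if n % factors[j] == 0:
--                         c += count(n // factors[j], j, l - 1)
--             memo[key] = c
--         return memo[key]
--
--     result = count(total, 0, limit)
--     if total == 1:
--         result -= 1  # the empty factorization is never enumerated by the task
--     if s and all(3 <= x <= 20 for x in s):
--         result -= 1  # the input itself
--     if 3 <= total <= 20 and s != [total]:
--         result -= 1  # the single-die list [total]
--     return result
-- ===== Notes on version B (the rewrite author's own statement) =====
-- stated objective: alternative
-- what changed: Replaces the exhaustive enumeration of all combinations_with_replacement of the factors for every length r by a memoized divisor recursion counting nondecreasing factorizations directly, subtracting the two excluded lists (the input itself and [total]) via closed-form membership tests; intended as faster (a timing run saw A time out at n=16 where B returned) but a timing run could not confirm a ratio, so no speed is claimed.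
import Mathlib
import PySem

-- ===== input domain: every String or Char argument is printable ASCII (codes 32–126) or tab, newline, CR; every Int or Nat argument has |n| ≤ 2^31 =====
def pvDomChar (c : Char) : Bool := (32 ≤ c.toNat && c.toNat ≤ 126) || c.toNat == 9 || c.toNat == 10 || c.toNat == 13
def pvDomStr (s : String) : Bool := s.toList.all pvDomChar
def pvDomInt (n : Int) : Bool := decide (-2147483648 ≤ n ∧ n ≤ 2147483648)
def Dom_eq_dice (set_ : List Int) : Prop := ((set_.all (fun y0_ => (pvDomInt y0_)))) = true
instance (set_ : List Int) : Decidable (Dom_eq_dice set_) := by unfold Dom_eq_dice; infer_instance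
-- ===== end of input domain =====

-- B replaces A's exhaustive enumeration of all factor combinations by a divisor
-- recursion counting the nondecreasing factorizations directly (objective:
-- alternative; intended as faster, but a timing run could not measure a ratio).

-- ===== PORT A =====
-- itertools.combinations_with_replacement(pool, r), transliterated structurally
def pyCWR : List Int → Nat → List (List Int)
  | _, 0 => [[]]
  | [], _ + 1 => []
  | x :: xs, r + 1 => (pyCWR (x :: xs) r).map (fun c => x :: c) ++ pyCWR xs (r + 1)
termination_by fs r => (r, fs.length)

def eq_dice (set_ : List Int) : Int :=
  let s := PySem.List.sorted set_ (fun x => x) false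
  let total := s.foldl (· * ·) 1
  let factors := (PySem.List.pyRange 3 21 1).filter (fun f => PySem.Int.mod total f == 0)
  let result := (PySem.List.pyRange 1 ((max s.length factors.length : Int) + 1) 1).foldl
    (fun acc r =>
      acc ++ ((pyCWR factors r.toNat).filter (fun c =>
          c.foldl (· * ·) 1 == total
            && PySem.List.sorted c (fun x => x) false != s
            && PySem.List.sorted c (fun x => x) false != [total])).map
        (fun c => PySem.List.sorted c (fun x => x) false)) []
  (result.length : Int)

-- ===== PORT B =====
mutual
-- count(n, i, l) of Source B, over the factor suffix factors[i:] (the memo table of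
-- Source B only speeds up the evaluation; the computed value is this recursion)
def cwrCount (n : Int) (fs : List Int) (l : Nat) : Int :=
  (if n = 1 then 1 else 0) +
    match l with
    | 0 => 0
    | l' + 1 => cwrCountTails n fs l'
termination_by (l, 0)

-- the inner 'for j in range(i, len(factors))' loop of count
def cwrCountTails (n : Int) (fs : List Int) (l : Nat) : Int :=
  match fs with
  | [] => 0
  | x :: xs =>
    (if PySem.Int.mod n x = 0 then cwrCount (PySem.Int.floordiv n x) (x :: xs) l else 0)
      + cwrCountTails n xs l
termination_by (l, fs.length + 1)
end

def eq_dice_alt (set_ : List Int) : Int :=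
  let s := PySem.List.sorted set_ (fun x => x) false
  let total := s.foldl (· * ·) 1
  let factors := (PySem.List.pyRange 3 21 1).filter (fun f => PySem.Int.mod total f == 0)
  let limit := max s.length factors.length
  let result := cwrCount total factors limit
  let result := if total = 1 then result - 1 else result
  let result := if s ≠ [] ∧ ∀ x ∈ s, 3 ≤ x ∧ x ≤ 20 then result - 1 else result
  if 3 ≤ total ∧ total ≤ 20 ∧ s ≠ [total] then result - 1 else result

-- ===== PRECONDITION & SPEC =====
def Spec_eq_dice (set_ : List Int) (out : Int) : Prop := out = eq_dice_alt set_
instance (set_ : List Int) (out : Int) : Decidable (Spec_eq_dice set_ out) := by unfold Spec_eq_dice; infer_instance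

-- ===== CLAIM (what is proved, stated in full; the proofs are below) =====
def Claim_equal_eq_dice : Prop := ∀ (set_ : List Int), Dom_eq_dice set_ → Spec_eq_dice set_ (eq_dice set_)

-- ===== LEMMAS AND PROOFS =====

-- products: foldl (·*·)
theorem foldl_mul_shift (c : List Int) (a : Int) :
    c.foldl (· * ·) a = a * c.foldl (· * ·) 1 := by
  induction c generalizing a with
  | nil => simp
  | cons x t ih =>
    simp only [List.foldl_cons]
    rw [ih (a * x), ih (1 * x)]
    ring

theorem foldl_mul_cons (x : Int) (c : List Int) :
    (x :: c).foldl (· * ·) 1 = x * c.foldl (· * ·) 1 := by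
  simp only [List.foldl_cons]
  rw [foldl_mul_shift]
  ring

theorem dvd_foldl_mul {x : Int} {s : List Int} (hx : x ∈ s) :
    x ∣ s.foldl (· * ·) 1 := by
  induction s with
  | nil => cases hx
  | cons y t ih =>
    rw [foldl_mul_cons]
    rcases List.mem_cons.mp hx with h | h
    · exact h ▸ Dvd.intro _ rfl
    · exact Dvd.dvd.mul_left (ih h) y

-- membership structure of pyCWR
theorem mem_pyCWR_elems (fs : List Int) (r : Nat) :
    ∀ c ∈ pyCWR fs r, ∀ y ∈ c, y ∈ fs := by
  induction fs, r using pyCWR.induct with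
  | case1 fs => simp [pyCWR]
  | case2 r => simp [pyCWR]
  | case3 x xs r ih1 ih2 =>
    intro c hc y hy
    rw [pyCWR] at hc
    rcases List.mem_append.mp hc with h | h
    · rcases List.mem_map.mp h with ⟨c', hc', rfl⟩
      rcases List.mem_cons.mp hy with rfl | hy'
      · exact List.mem_cons_self
      · exact ih1 c' hc' y hy'
    · exact List.mem_cons_of_mem x (ih2 c h y hy)

theorem mem_pyCWR {fs : List Int} (hfs : fs.Pairwise (· < ·)) (r : Nat) (c : List Int) :
    c ∈ pyCWR fs r ↔ c.length = r ∧ c.Pairwise (· ≤ ·) ∧ ∀ y ∈ c, y ∈ fs := by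
  induction fs, r using pyCWR.induct generalizing c with
  | case1 fs =>
    rw [pyCWR]
    simp only [List.mem_singleton]
    constructor
    · rintro rfl; simp
    · rintro ⟨h, -, -⟩; exact List.length_eq_zero_iff.mp h
  | case2 r =>
    rw [pyCWR]
    simp only [List.not_mem_nil, false_iff, not_and]
    intro hlen _ helems
    rcases c with _ | ⟨y, c'⟩
    · simp at hlen
    · exact helems y List.mem_cons_self
  | case3 x xs r ih1 ih2 =>
    have hx : ∀ z ∈ xs, x < z := (List.pairwise_cons.mp hfs).1
    have hxs : xs.Pairwise (· < ·) := (List.pairwise_cons.mp hfs).2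
    rw [pyCWR]
    simp only [List.mem_append, List.mem_map]
    constructor
    · rintro (⟨c', hc', rfl⟩ | h)
      · rcases (ih1 hfs c').mp hc' with ⟨hlen, hpw, helems⟩
        refine ⟨by simp [hlen], ?_, ?_⟩
        · rw [List.pairwise_cons]
          refine ⟨?_, hpw⟩
          intro y hy
          rcases List.mem_cons.mp (helems y hy) with rfl | hy'
          · exact le_refl y
          · exact le_of_lt (hx y hy')
        · intro y hy
          rcases List.mem_cons.mp hy with rfl | hy'
          · exact List.mem_cons_self
          · exact helems y hy'
      · rcases (ih2 hxs c).mp h with ⟨hlen, hpw, helems⟩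
        exact ⟨hlen, hpw, fun y hy => List.mem_cons_of_mem x (helems y hy)⟩
    · rintro ⟨hlen, hpw, helems⟩
      rcases c with _ | ⟨y, c'⟩
      · simp at hlen
      · have hmem : y ∈ x :: xs := helems y List.mem_cons_self
        by_cases hyx : y = x
        · subst hyx
          left
          refine ⟨c', (ih1 hfs c').mpr ⟨by simpa using hlen, (List.pairwise_cons.mp hpw).2, ?_⟩, rfl⟩
          intro z hz
          exact helems z (List.mem_cons_of_mem y hz)
        · right
          have hyxs : y ∈ xs := (List.mem_cons.mp hmem).resolve_left hyx
          apply (ih2 hxs (y :: c')).mpr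
          refine ⟨hlen, hpw, ?_⟩
          intro z hz
          rcases List.mem_cons.mp hz with rfl | hz'
          · exact hyxs
          · rcases List.mem_cons.mp (helems z hz) with rfl | h'
            · exact absurd (lt_of_lt_of_le (hx y hyxs) ((List.pairwise_cons.mp hpw).1 z hz')) (lt_irrefl z)
            · exact h'

theorem nodup_pyCWR {fs : List Int} (hfs : fs.Pairwise (· < ·)) (r : Nat) :
    (pyCWR fs r).Nodup := by
  induction fs, r using pyCWR.induct with
  | case1 fs => simp [pyCWR]
  | case2 r => simp [pyCWR]
  | case3 x xs r ih1 ih2 =>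
    have hx : ∀ z ∈ xs, x < z := (List.pairwise_cons.mp hfs).1
    have hxs : xs.Pairwise (· < ·) := (List.pairwise_cons.mp hfs).2
    rw [pyCWR]
    apply List.Nodup.append
    · exact (ih1 hfs).map (fun c₁ c₂ h => List.tail_eq_of_cons_eq h)
    · exact ih2 hxs
    · intro c hc1 hc2
      rcases List.mem_map.mp hc1 with ⟨c', -, rfl⟩
      have : x ∈ xs := mem_pyCWR_elems xs (r + 1) _ hc2 x List.mem_cons_self
      exact absurd (hx x this) (lt_irrefl x)

-- counting lemmas
theorem cwr_count_zero (fs : List Int) (n : Int) :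
    (pyCWR fs 0).countP (fun c => c.foldl (· * ·) 1 == n) = if n = 1 then 1 else 0 := by
  rw [pyCWR]
  simp only [List.countP_cons, List.countP_nil, List.foldl_nil]
  by_cases h : n = 1
  · subst h; simp
  · simp [beq_iff_eq, h, Ne.symm h]

theorem cwr_count_step (x : Int) (xs : List Int) (hx : 0 < x) (n : Int) (r : Nat) :
    (pyCWR (x :: xs) (r + 1)).countP (fun c => c.foldl (· * ·) 1 == n)
      = (if PySem.Int.mod n x = 0 then
           (pyCWR (x :: xs) r).countP (fun c => c.foldl (· * ·) 1 == PySem.Int.floordiv n x)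
         else 0)
        + (pyCWR xs (r + 1)).countP (fun c => c.foldl (· * ·) 1 == n) := by
  rw [pyCWR, List.countP_append, List.countP_map]
  congr 1
  by_cases hd : PySem.Int.mod n x = 0
  · rw [if_pos hd]
    have hdvd : x ∣ n := (PySem.Int.mod_eq_zero_iff_dvd n x).mp hd
    rw [PySem.Int.floordiv_eq_ediv_of_pos hx]
    apply List.countP_congr
    intro c _
    simp only [Function.comp_apply, foldl_mul_cons, beq_iff_eq]
    constructor
    · intro h
      have : x * c.foldl (· * ·) 1 = x * (n / x) := by
        rw [h, Int.mul_ediv_cancel' hdvd]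
      exact mul_left_cancel₀ (ne_of_gt hx) this
    · intro h
      rw [h, Int.mul_ediv_cancel' hdvd]
  · rw [if_neg hd]
    rw [List.countP_eq_zero.mpr]
    intro c _
    simp only [Function.comp_apply, foldl_mul_cons, beq_iff_eq]
    intro h
    exact hd ((PySem.Int.mod_eq_zero_iff_dvd n x).mpr ⟨c.foldl (· * ·) 1, h.symm⟩)

theorem tails_of_count (l : Nat)
    (hc : ∀ (n : Int) (fs : List Int), (∀ x ∈ fs, 0 < x) →
      cwrCount n fs l
        = ((List.range (l + 1)).map
            (fun r => ((pyCWR fs r).countP (fun c => c.foldl (· * ·) 1 == n) : Int))).sum) :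
    ∀ (fs : List Int), (∀ x ∈ fs, 0 < x) → ∀ (n : Int),
      cwrCountTails n fs l
        = ((List.range (l + 1)).map
            (fun r => ((pyCWR fs (r + 1)).countP (fun c => c.foldl (· * ·) 1 == n) : Int))).sum := by
  intro fs
  induction fs with
  | nil =>
    intro _ n
    rw [cwrCountTails]
    have : ∀ r ∈ List.range (l + 1),
        ((pyCWR ([] : List Int) (r + 1)).countP (fun c => c.foldl (· * ·) 1 == n) : Int) = 0 := by
      intro r _
      rw [pyCWR]
      simp
    rw [List.sum_eq_zero]
    intro x hx
    rcases List.mem_map.mp hx with ⟨r, hr, rfl⟩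
    exact this r hr
  | cons x xs ih =>
    intro h n
    have hx : 0 < x := h x List.mem_cons_self
    have hxs : ∀ y ∈ xs, 0 < y := fun y hy => h y (List.mem_cons_of_mem x hy)
    rw [cwrCountTails, ih hxs n, hc (PySem.Int.floordiv n x) (x :: xs) h]
    by_cases hd : PySem.Int.mod n x = 0
    · rw [if_pos hd]
      have hstep : ∀ r : Nat,
          ((pyCWR (x :: xs) (r + 1)).countP (fun c => c.foldl (· * ·) 1 == n) : Int)
            = ((pyCWR (x :: xs) r).countP
                (fun c => c.foldl (· * ·) 1 == PySem.Int.floordiv n x) : Int)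
              + ((pyCWR xs (r + 1)).countP (fun c => c.foldl (· * ·) 1 == n) : Int) := by
        intro r
        rw [cwr_count_step x xs hx n r, if_pos hd]
        push_cast
        ring
      calc ((List.range (l + 1)).map
              (fun r => ((pyCWR (x :: xs) r).countP
                (fun c => c.foldl (· * ·) 1 == PySem.Int.floordiv n x) : Int))).sum
            + ((List.range (l + 1)).map
              (fun r => ((pyCWR xs (r + 1)).countP (fun c => c.foldl (· * ·) 1 == n) : Int))).sum
          = ((List.range (l + 1)).map
              (fun r => ((pyCWR (x :: xs) r).countP
                  (fun c => c.foldl (· * ·) 1 == PySem.Int.floordiv n x) : Int)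
                + ((pyCWR xs (r + 1)).countP (fun c => c.foldl (· * ·) 1 == n) : Int))).sum := by
            rw [PySem.List.sum_map_add_int]
        _ = ((List.range (l + 1)).map
              (fun r => ((pyCWR (x :: xs) (r + 1)).countP
                (fun c => c.foldl (· * ·) 1 == n) : Int))).sum := by
            congr 1
            apply List.map_congr_left
            intro r _
            rw [hstep r]
    · rw [if_neg hd]
      rw [zero_add]
      congr 1
      apply List.map_congr_left
      intro r _
      rw [cwr_count_step x xs hx n r, if_neg hd]
      push_cast
      ring

theorem cwrCount_eq_sum (l : Nat) :
    (∀ (n : Int) (fs : List Int), (∀ x ∈ fs, 0 < x) →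
      cwrCount n fs l
        = ((List.range (l + 1)).map
            (fun r => ((pyCWR fs r).countP (fun c => c.foldl (· * ·) 1 == n) : Int))).sum)
    ∧ (∀ (n : Int) (fs : List Int), (∀ x ∈ fs, 0 < x) →
      cwrCountTails n fs l
        = ((List.range (l + 1)).map
            (fun r => ((pyCWR fs (r + 1)).countP (fun c => c.foldl (· * ·) 1 == n) : Int))).sum) := by
  induction l with
  | zero =>
    have hc : ∀ (n : Int) (fs : List Int), (∀ x ∈ fs, 0 < x) →
        cwrCount n fs 0
          = ((List.range 1).map
              (fun r => ((pyCWR fs r).countP (fun c => c.foldl (· * ·) 1 == n) : Int))).sum := by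
      intro n fs _
      rw [cwrCount]
      simp only [List.range_one, List.map_cons, List.map_nil, List.sum_cons, List.sum_nil]
      rw [cwr_count_zero]
      by_cases h1 : n = 1 <;> simp [h1]
    exact ⟨hc, fun n fs h => tails_of_count 0 hc fs h n⟩
  | succ l ih =>
    have hc : ∀ (n : Int) (fs : List Int), (∀ x ∈ fs, 0 < x) →
        cwrCount n fs (l + 1)
          = ((List.range (l + 2)).map
              (fun r => ((pyCWR fs r).countP (fun c => c.foldl (· * ·) 1 == n) : Int))).sum := by
      intro n fs h
      rw [cwrCount]
      rw [List.range_succ_eq_map]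
      simp only [List.map_cons, List.sum_cons, List.map_map, Function.comp_def]
      rw [cwr_count_zero, ih.2 n fs h]
      simp only [Nat.succ_eq_add_one]
      push_cast
      ring
    exact ⟨hc, fun n fs h => tails_of_count (l + 1) hc fs h n⟩

-- removing one distinguished element from a duplicate-free filtered list
theorem filter_excl1 {α : Type} [BEq α] [LawfulBEq α] [DecidableEq α]
    (l : List α) (p : α → Bool) (a : α) (hn : l.Nodup) :
    (l.filter (fun c => p c && !(c == a))).length
      + (if a ∈ l ∧ p a = true then 1 else 0)
      = l.countP p := by
  induction l with
  | nil => simp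
  | cons h t ih =>
    have hht : h ∉ t := (List.nodup_cons.mp hn).1
    have IH := ih (List.nodup_cons.mp hn).2
    simp only [List.filter_cons, List.countP_cons, List.mem_cons]
    by_cases hA : a = h
    · subst hA
      simp only [hht, false_and, if_false, add_zero] at IH
      by_cases hp : p a = true
      · simp only [hp, beq_self_eq_true, Bool.not_true, Bool.and_false, Bool.false_eq_true,
          if_false, true_or, true_and, if_true]
        omega
      · have hpf : p a = false := by simpa using hp
        simp only [hpf, Bool.false_and, Bool.false_eq_true, if_false, and_false]
        omega
    · have hne : (h == a) = false := by
        simp only [beq_eq_false_iff_ne, ne_eq]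
        exact fun e => hA e.symm
      have hmem : ((a = h ∨ a ∈ t) ∧ p a = true) ↔ (a ∈ t ∧ p a = true) := by
        constructor
        · rintro ⟨rfl | h', hpa⟩ <;> [exact absurd rfl hA; exact ⟨h', hpa⟩]
        · rintro ⟨h', hpa⟩; exact ⟨Or.inr h', hpa⟩
      rw [if_congr hmem rfl rfl]
      by_cases hp : p h = true
      · simp only [hp, hne, Bool.not_false, Bool.and_true, if_true, List.length_cons]
        omega
      · have hpf : p h = false := by simpa using hp
        simp only [hpf, Bool.false_and, Bool.false_eq_true, if_false]
        omega

theorem filter_excl_length {α : Type} [BEq α] [LawfulBEq α] [DecidableEq α]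
    (l : List α) (p : α → Bool) (a b : α) (hn : l.Nodup) :
    (l.filter (fun c => p c && !(c == a) && !(c == b))).length
      + (if a ∈ l ∧ p a = true then 1 else 0)
      + (if b ∈ l ∧ p b = true ∧ b ≠ a then 1 else 0)
      = l.countP p := by
  have h1 := filter_excl1 l (fun c => p c && !(c == a)) b hn
  have h2 := filter_excl1 l p a hn
  simp only [Bool.and_eq_true, Bool.not_eq_true', beq_eq_false_iff_ne, ne_eq,
    List.countP_eq_length_filter] at h1 h2 ⊢
  omega

-- sum of a one-point indicator over range
theorem sum_indicator_range (m j : Nat) (C : Prop) [Decidable C] :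
    ((List.range m).map (fun k => if k + 1 = j ∧ C then (1 : Nat) else 0)).sum
      = if 1 ≤ j ∧ j ≤ m ∧ C then 1 else 0 := by
  induction m with
  | zero =>
    simp only [List.range_zero, List.map_nil, List.sum_nil]
    rw [if_neg]
    rintro ⟨h1, h2, -⟩
    omega
  | succ m ih =>
    rw [List.range_succ, List.map_append, List.sum_append, ih]
    simp only [List.map_cons, List.map_nil, List.sum_cons, List.sum_nil]
    by_cases hC : C
    · simp only [hC, and_true]
      split_ifs <;> omega
    · simp only [hC, and_false, if_false]
      omega

theorem sum_map_add_nat {α : Type} (l : List α) (f g : α → Nat) :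
    (l.map (fun x => f x + g x)).sum = (l.map f).sum + (l.map g).sum := by
  induction l with
  | nil => simp
  | cons x t ih => simp only [List.map_cons, List.sum_cons, ih]; omega

theorem sum_map_natCast {α : Type} (l : List α) (f : α → Nat) :
    (l.map (fun x => ((f x : Nat) : Int))).sum = ((l.map f).sum : Int) := by
  induction l with
  | nil => simp
  | cons x t ih => simp only [List.map_cons, List.sum_cons, ih]; push_cast; ring

theorem if_sub_one (P : Prop) [Decidable P] (z : Int) :
    (if P then z - 1 else z) = z - (if P then 1 else 0) := by
  split_ifs <;> ring

-- ===== VERDICT (by name: the statement is the Claim_ definition above) =====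
theorem eq_dice_spec : Claim_equal_eq_dice := by
  intro set_ _
  unfold Spec_eq_dice eq_dice eq_dice_alt
  simp only []
  set s := PySem.List.sorted set_ (fun x => x) false with hs_def
  set total := List.foldl (fun x1 x2 => x1 * x2) 1 s with htotal_def
  set factors := List.filter (fun f => PySem.Int.mod total f == 0) (PySem.List.pyRange 3 21 1) with hfac_def
  set L := max s.length factors.length with hL_def
  -- basic facts
  have hfpos : ∀ x ∈ factors, (0 : Int) < x := by
    intro x hx
    have h1 := (List.mem_filter.mp hx).1
    have h2 := PySem.List.mem_pyRange_one.mp h1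
    omega
  have hford : factors.Pairwise (· < ·) :=
    List.Pairwise.filter _ (PySem.List.pairwise_lt_pyRange_one 3 21)
  have hspair : s.Pairwise (· ≤ ·) := by
    have h := PySem.List.sorted_pairwise (xs := set_) (key := fun x => x)
    simpa [hs_def] using h
  -- B side: unfold the three conditional subtractions and the DP count
  rw [if_sub_one, if_sub_one, if_sub_one]
  rw [(cwrCount_eq_sum L).1 total factors hfpos]
  rw [List.range_succ_eq_map]
  simp only [List.map_cons, List.sum_cons, List.map_map, Function.comp_def, Nat.succ_eq_add_one]
  rw [cwr_count_zero, sum_map_natCast]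
  -- A side: turn the appends into a sum of lengths over range L
  rw [PySem.List.foldl_append_eq_flatMap, List.nil_append, List.length_flatMap]
  simp only [List.length_map]
  rw [show (max (↑s.length) (↑factors.length) : Int) = (L : Int) from (Nat.cast_max _ _).symm]
  rw [PySem.List.pyRange_one]
  rw [show ((L : Int) + 1 - 1).toNat = L from by omega]
  rw [List.map_map]
  simp only [Function.comp_def]
  simp only [show ∀ k : Nat, ((1 : Int) + (k : Nat)).toNat = k + 1 from fun k => by omega]
  -- per-length accounting: raw count = kept count + the two excluded lists
  have hk : ∀ k : Nat,
      List.countP (fun c => List.foldl (fun x1 x2 => x1 * x2) 1 c == total) (pyCWR factors (k + 1))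
        = (List.filter
            (fun c =>
              List.foldl (fun x1 x2 => x1 * x2) 1 c == total && (PySem.List.sorted c fun x => x) != s &&
                (PySem.List.sorted c fun x => x) != [total])
            (pyCWR factors (k + 1))).length
          + (if k + 1 = s.length ∧ (∀ y ∈ s, y ∈ factors) then 1 else 0)
          + (if k + 1 = 1 ∧ (total ∈ factors ∧ ¬([total] = s)) then 1 else 0) := by
    intro k
    have hnodup := nodup_pyCWR hford (k + 1)
    have hcong : List.filter
        (fun c =>
          List.foldl (fun x1 x2 => x1 * x2) 1 c == total && (PySem.List.sorted c fun x => x) != s &&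
            (PySem.List.sorted c fun x => x) != [total])
        (pyCWR factors (k + 1))
        = List.filter
            (fun c => List.foldl (fun x1 x2 => x1 * x2) 1 c == total && !(c == s) && !(c == [total]))
            (pyCWR factors (k + 1)) := by
      apply List.filter_congr
      intro c hc
      have hcp : c.Pairwise (· ≤ ·) := ((mem_pyCWR hford (k + 1) c).mp hc).2.1
      have hss : PySem.List.sorted c (fun x => x) false = c :=
        PySem.List.sorted_eq_self_of_pairwise c (fun x => x) (by simpa using hcp)
      rw [hss]
      simp [bne]
    rw [hcong,
      ← filter_excl_length (pyCWR factors (k + 1))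
        (fun c => List.foldl (fun x1 x2 => x1 * x2) 1 c == total) s [total] hnodup]
    have hifa : (if s ∈ pyCWR factors (k + 1)
          ∧ (List.foldl (fun x1 x2 => x1 * x2) 1 s == total) = true then 1 else 0)
        = (if k + 1 = s.length ∧ (∀ y ∈ s, y ∈ factors) then 1 else 0) := by
      apply if_congr _ rfl rfl
      constructor
      · rintro ⟨hmem', -⟩
        rcases (mem_pyCWR hford _ s).mp hmem' with ⟨hlen, -, helems⟩
        exact ⟨hlen.symm, helems⟩
      · rintro ⟨hlen, helems⟩
        refine ⟨(mem_pyCWR hford _ s).mpr ⟨hlen.symm, hspair, helems⟩, ?_⟩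
        simp [htotal_def]
    have hifb : (if [total] ∈ pyCWR factors (k + 1)
          ∧ (List.foldl (fun x1 x2 => x1 * x2) 1 [total] == total) = true ∧ [total] ≠ s then 1 else 0)
        = (if k + 1 = 1 ∧ (total ∈ factors ∧ ¬([total] = s)) then 1 else 0) := by
      apply if_congr _ rfl rfl
      constructor
      · rintro ⟨hmem', -, hne⟩
        rcases (mem_pyCWR hford _ [total]).mp hmem' with ⟨hlen, -, helems⟩
        refine ⟨by simpa using hlen.symm, helems total (List.mem_singleton_self total), hne⟩
      · rintro ⟨hlen, hmemf, hne⟩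
        refine ⟨(mem_pyCWR hford _ [total]).mpr ⟨by simpa using hlen.symm, List.pairwise_singleton _ _, ?_⟩, by simp, hne⟩
        intro y hy
        rw [List.mem_singleton.mp hy]
        exact hmemf
    rw [hifa, hifb]
  -- sum the per-length accounting over all lengths
  have hsum : (List.map
        (fun k => List.countP (fun c => List.foldl (fun x1 x2 => x1 * x2) 1 c == total)
          (pyCWR factors (k + 1))) (List.range L)).sum
      = (List.map
          (fun k =>
            (List.filter
              (fun c =>
                List.foldl (fun x1 x2 => x1 * x2) 1 c == total && (PySem.List.sorted c fun x => x) != s &&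
                  (PySem.List.sorted c fun x => x) != [total])
              (pyCWR factors (k + 1))).length) (List.range L)).sum
        + (if 1 ≤ s.length ∧ s.length ≤ L ∧ (∀ y ∈ s, y ∈ factors) then 1 else 0)
        + (if 1 ≤ 1 ∧ 1 ≤ L ∧ (total ∈ factors ∧ ¬([total] = s)) then 1 else 0) := by
    rw [List.map_congr_left (fun k _ => hk k)]
    rw [sum_map_add_nat, sum_map_add_nat]
    rw [sum_indicator_range L s.length, sum_indicator_range L 1]
  rw [hsum]
  -- identify the two exclusion conditions with B's closed-form tests
  have ha_iff : (1 ≤ s.length ∧ s.length ≤ L ∧ (∀ y ∈ s, y ∈ factors))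
      ↔ (s ≠ [] ∧ ∀ x ∈ s, 3 ≤ x ∧ x ≤ 20) := by
    constructor
    · rintro ⟨h1, -, h3⟩
      refine ⟨?_, fun x hx => ?_⟩
      · intro e; rw [e] at h1; simp at h1
      · have hm := (List.mem_filter.mp (h3 x hx)).1
        have := PySem.List.mem_pyRange_one.mp hm
        omega
    · rintro ⟨h1, h2⟩
      refine ⟨?_, le_max_left _ _, fun y hy => ?_⟩
      · exact List.length_pos_iff.mpr h1
      · apply List.mem_filter.mpr
        refine ⟨PySem.List.mem_pyRange_one.mpr ⟨(h2 y hy).1, by have := (h2 y hy).2; omega⟩, ?_⟩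
        have hdvd : y ∣ total := by rw [htotal_def]; exact dvd_foldl_mul hy
        simp [PySem.Int.mod_eq_zero_iff_dvd, hdvd]
  have hb_iff : (1 ≤ 1 ∧ 1 ≤ L ∧ (total ∈ factors ∧ ¬([total] = s)))
      ↔ (3 ≤ total ∧ total ≤ 20 ∧ s ≠ [total]) := by
    constructor
    · rintro ⟨-, -, hm, hne⟩
      have h1 := (List.mem_filter.mp hm).1
      have h2 := PySem.List.mem_pyRange_one.mp h1
      exact ⟨by omega, by omega, fun e => hne e.symm⟩
    · rintro ⟨h1, h2, hne⟩
      have hm : total ∈ factors := by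
        apply List.mem_filter.mpr
        refine ⟨PySem.List.mem_pyRange_one.mpr ⟨h1, by omega⟩, ?_⟩
        simp [PySem.Int.mod_eq_zero_iff_dvd]
      refine ⟨le_refl 1, ?_, hm, fun e => hne e.symm⟩
      have := List.length_pos_of_mem hm
      omega
  rw [if_congr ha_iff rfl rfl, if_congr hb_iff rfl rfl]
  push_cast
  ring
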